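-- pv_equiv track=rewrite | github.com/xmuyulab/DreamDIA | utils.py | get_precursor_indices
-- ===== SOURCE A (Python) =====
-- def get_precursor_indices(precursor_ids):
--     """
--     Get the indices of each unique precursor in the list of precursor IDs.
--
--     Parameters:
--     - precursor_ids: List of precursor IDs.
--
--     Returns:
--     - List of lists containing the indices of each unique precursor.
--
--     Example usage:
--     >>> precursor_ids = ["A", "A", "B", "B", "B", "C", "C", "A"]
--     >>> get_precursor_indices(precursor_ids)
--     [[0, 1], [2, 3, 4], [5, 6], [7]]
--     """
--     precursor_indices = []
--     last_precursor = None
--     current_indices = []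
--
--     for index, precursor in enumerate(precursor_ids):
--         if precursor != last_precursor:
--             if current_indices:
--                 precursor_indices.append(current_indices)
--             current_indices = [index]
--         else:
--             current_indices.append(index)
--         last_precursor = precursor
--
--     if current_indices:
--         precursor_indices.append(current_indices)
--
--     return precursor_indices
-- ===== SOURCE B (Python) =====
-- def get_precursor_indices(precursor_ids):
--     n = len(precursor_ids)
--     bounds = [i for i in range(n) if i == 0 or precursor_ids[i] != precursor_ids[i - 1]]
--     bounds.append(n)
--     return [list(range(a, b)) for a, b in zip(bounds, bounds[1:])]
-- ===== Notes on version B (the rewrite author's own statement) =====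
-- stated objective: alternative
-- what changed: Replaces A's single-pass last_precursor/current_indices state machine with two staged passes: first detect run boundaries by pairwise comparison of adjacent elements, then slice range(n) between consecutive boundaries via zip(bounds, bounds[1:]).
import Mathlib
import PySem

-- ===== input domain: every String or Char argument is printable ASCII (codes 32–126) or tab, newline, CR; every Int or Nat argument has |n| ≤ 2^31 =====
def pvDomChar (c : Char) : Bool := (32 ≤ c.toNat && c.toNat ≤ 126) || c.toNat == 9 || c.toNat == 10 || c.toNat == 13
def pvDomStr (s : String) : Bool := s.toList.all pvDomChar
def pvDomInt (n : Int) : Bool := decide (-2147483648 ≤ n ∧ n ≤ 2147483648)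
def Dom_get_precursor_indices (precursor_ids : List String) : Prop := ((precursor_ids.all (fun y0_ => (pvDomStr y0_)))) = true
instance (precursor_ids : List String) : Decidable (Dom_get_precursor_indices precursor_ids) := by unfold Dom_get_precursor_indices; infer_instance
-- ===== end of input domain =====

-- B replaces A's one-pass last_precursor/current_indices state machine by two staged
-- passes: boundary detection via pairwise comparison, then slicing range(n) between
-- consecutive boundaries; same O(n) cost, a different decomposition.

-- ===== PORT A =====
-- A's for-loop over enumerate(precursor_ids), carrying the same state
-- (precursor_indices, last_precursor, current_indices); returns (acc, current_indices).
def pvALoop : List String → Int → List (List Int) → Option String → List Int →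
    (List (List Int) × List Int)
  | [], _, acc, _, cur => (acc, cur)
  | p :: rest, i, acc, last, cur =>
    if some p ≠ last then
      pvALoop rest (i + 1) (if cur ≠ [] then acc ++ [cur] else acc) (some p) [i]
    else
      pvALoop rest (i + 1) acc (some p) (cur ++ [i])

def get_precursor_indices (precursor_ids : List String) : List (List Int) :=
  let r := pvALoop precursor_ids 0 [] none []
  if r.2 ≠ [] then r.1 ++ [r.2] else r.1

-- ===== PORT B =====
-- B's two passes: the boundary comprehension (the `i == 0 ||` short-circuit guards the
-- i-1 access exactly as in Python; pyGet? is total, and both indices are in range when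
-- read), then the zip of bounds with bounds[1:] mapped through range(a, b).
def get_precursor_indices_alt (precursor_ids : List String) : List (List Int) :=
  let n : Int := PySem.List.len precursor_ids
  let bounds : List Int := (PySem.List.pyRange 0 n 1).filter
      (fun i => i == 0 ||
        (PySem.List.pyGet? precursor_ids i != PySem.List.pyGet? precursor_ids (i - 1)))
  let bounds2 : List Int := bounds ++ [n]
  (bounds2.zip (PySem.List.slice bounds2 (some 1) none)).map
      (fun ab => PySem.List.pyRange ab.1 ab.2 1)

-- ===== PRECONDITION & SPEC =====
def Spec_get_precursor_indices (precursor_ids : List String) (out : List (List Int)) : Prop := out = get_precursor_indices_alt precursor_ids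
instance (precursor_ids : List String) (out : List (List Int)) : Decidable (Spec_get_precursor_indices precursor_ids out) := by unfold Spec_get_precursor_indices; infer_instance

-- ===== CLAIM (what is proved, stated in full; the proofs are below) =====
def Claim_equal_get_precursor_indices : Prop := ∀ (precursor_ids : List String), Dom_get_precursor_indices precursor_ids → Spec_get_precursor_indices precursor_ids (get_precursor_indices precursor_ids)

-- ===== LEMMAS AND PROOFS =====

-- Proof-side middle form: the run-by-run recursion both sides are reduced to.
def pvBLoop : List String → Int → List (List Int)
  | [], _ => []
  | x :: rest, start =>
    let n : Int := 1 + (rest.takeWhile (· == x)).length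
    PySem.List.pyRange start (start + n) 1 ::
      pvBLoop (rest.dropWhile (· == x)) (start + n)
termination_by l _ => l.length
decreasing_by
  have := List.length_dropWhile_le (p := (· == x)) (l := rest)
  simp only [List.length_cons]
  omega

-- finishing step of A: append the pending run if nonempty
def pvFinish (r : List (List Int) × List Int) : List (List Int) :=
  if r.2 ≠ [] then r.1 ++ [r.2] else r.1

-- A-side invariant: once A's loop has last = some x and a nonempty pending run `cur`,
-- the finished result is acc, then cur extended by the indices of the remaining run
-- of x, then the run recursion on the rest.
theorem pvALoop_inv (xs : List String) : ∀ (i : Int) (acc : List (List Int))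
    (x : String) (cur : List Int), cur ≠ [] →
    pvFinish (pvALoop xs i acc (some x) cur) =
      acc ++ (cur ++ PySem.List.pyRange i (i + (xs.takeWhile (· == x)).length) 1) ::
        pvBLoop (xs.dropWhile (· == x)) (i + (xs.takeWhile (· == x)).length) := by
  induction xs with
  | nil =>
    intro i acc x cur hcur
    simp [pvALoop, pvFinish, hcur, pvBLoop, PySem.List.pyRange_one_eq_nil]
  | cons p rest ih =>
    intro i acc x cur hcur
    by_cases hpx : p = x
    · subst hpx
      have hb : (p == p) = true := by simp
      simp only [List.takeWhile_cons, List.dropWhile_cons, hb, if_true, List.length_cons]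
      have hstep : pvALoop (p :: rest) i acc (some p) cur =
          pvALoop rest (i + 1) acc (some p) (cur ++ [i]) := by
        simp [pvALoop]
      rw [hstep, ih (i + 1) acc p (cur ++ [i]) (by simp)]
      have hcast : ((((rest.takeWhile (· == p)).length + 1 : ℕ)) : ℤ) =
          ((rest.takeWhile (· == p)).length : ℤ) + 1 := by push_cast; ring
      rw [hcast]
      have hre : i + (((rest.takeWhile (· == p)).length : ℤ) + 1) =
          (i + 1) + ((rest.takeWhile (· == p)).length : ℤ) := by ring
      rw [hre]
      rw [PySem.List.pyRange_one_cons (a := i) (b := (i + 1) + ((rest.takeWhile (· == p)).length : ℤ)) (by omega)]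
      simp
    · have hb : (p == x) = false := by simp [hpx]
      simp only [List.takeWhile_cons, List.dropWhile_cons, hb, Bool.false_eq_true, if_false,
        List.length_nil, Int.natCast_zero, add_zero]
      have hstep : pvALoop (p :: rest) i acc (some x) cur =
          pvALoop rest (i + 1) (acc ++ [cur]) (some p) [i] := by
        simp [pvALoop, hcur, hpx]
      rw [hstep, ih (i + 1) (acc ++ [cur]) p [i] (by simp)]
      simp only [pvBLoop]
      have hre : i + (1 + ((rest.takeWhile (· == p)).length : ℤ)) =
          (i + 1) + ((rest.takeWhile (· == p)).length : ℤ) := by ring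
      rw [hre]
      rw [PySem.List.pyRange_one_cons (a := i) (b := (i + 1) + ((rest.takeWhile (· == p)).length : ℤ)) (by omega)]
      simp

-- A equals the run recursion.
theorem pvA_eq_pvBLoop (xs : List String) : get_precursor_indices xs = pvBLoop xs 0 := by
  match xs with
  | [] => simp [get_precursor_indices, pvALoop, pvBLoop]
  | p :: rest =>
    have hA : get_precursor_indices (p :: rest) =
        pvFinish (pvALoop rest 1 [] (some p) [0]) := by
      simp [get_precursor_indices, pvFinish, pvALoop]
    rw [hA, pvALoop_inv rest 1 [] p [0] (by simp)]
    show _ = pvBLoop (p :: rest) 0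
    simp only [pvBLoop]
    have hre : (0 : ℤ) + (1 + ((rest.takeWhile (· == p)).length : ℤ)) =
        (0 + 1) + ((rest.takeWhile (· == p)).length : ℤ) := by ring
    rw [hre]
    rw [PySem.List.pyRange_one_cons (a := (0:ℤ)) (b := ((0:ℤ) + 1) + ((rest.takeWhile (· == p)).length : ℤ)) (by omega)]
    simp

-- B-side Nat-level forms of the boundary pass.
def pvPredN (xs : List String) (k : Nat) : Bool := k == 0 || (xs[k]? != xs[k - 1]?)

def pvBndsN (xs : List String) : List Nat := (List.range xs.length).filter (pvPredN xs)

def pvFullN (xs : List String) : List Nat := pvBndsN xs ++ [xs.length]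

-- The Int predicate of the port agrees with the Nat predicate on cast indices.
theorem pvPred_cast (xs : List String) (k : Nat) :
    ((k : Int) == 0 ||
      (PySem.List.pyGet? xs (k : Int) != PySem.List.pyGet? xs ((k : Int) - 1))) =
    pvPredN xs k := by
  cases k with
  | zero => simp [pvPredN]
  | succ j =>
    have h1 : ((j + 1 : Nat) : Int) - 1 = (j : Int) := by push_cast; ring
    have h0 : (((j + 1 : Nat) : Int) == 0) = false := by
      simp only [beq_eq_false_iff_ne, ne_eq]
      intro h
      omega
    simp only [h1, h0, PySem.List.pyGet?_natCast, pvPredN, Bool.false_or]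
    have : ((j + 1 == 0 : Bool)) = false := by simp
    simp [this]

-- Boundary structure of one run: boundaries of run ++ ys are 0 and the shifted
-- boundaries of ys.
theorem pvBndsN_run (c : String) (t ys : List String) (ht : ∀ a ∈ t, a = c)
    (hys : ∀ x xs', ys = x :: xs' → x ≠ c) :
    pvBndsN ((c :: t) ++ ys) = 0 :: (pvBndsN ys).map ((t.length + 1) + ·) := by
  have hrunElem : ∀ i, i < t.length + 1 → ((c :: t) ++ ys)[i]? = some c := by
    intro i hi
    rw [List.getElem?_append_left (by simpa using hi)]
    rw [List.getElem?_eq_getElem (by simpa using hi)]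
    cases i with
    | zero => rfl
    | succ j =>
      have hj : j < t.length := by omega
      simp only [List.getElem_cons_succ, Option.some.injEq]
      exact ht _ (List.getElem_mem hj)
  have hysElem : ∀ j, j < ys.length → ((c :: t) ++ ys)[t.length + 1 + j]? = ys[j]? := by
    intro j hj
    rw [List.getElem?_append_right (by simp)]
    congr 1
    simp only [List.length_cons]
    omega
  unfold pvBndsN
  have hlen : ((c :: t) ++ ys).length = (t.length + 1) + ys.length := by simp; omega
  rw [hlen, List.range_add, List.filter_append]
  have hpart1 : (List.range (t.length + 1)).filter (pvPredN ((c :: t) ++ ys)) = [0] := by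
    rw [(by simpa [Nat.succ_eq_add_one] using List.range_succ_eq_map (n := t.length) :
          List.range (t.length + 1) = 0 :: (List.range t.length).map (·+1))]
    rw [List.filter_cons_of_pos (by simp [pvPredN])]
    have : ((List.range t.length).map (·+1)).filter (pvPredN ((c :: t) ++ ys)) = [] := by
      rw [List.filter_eq_nil_iff]
      intro a ha
      obtain ⟨j, hj, rfl⟩ := by simpa using ha
      simp only [pvPredN, Nat.add_sub_cancel]
      rw [hrunElem (j + 1) (by omega), hrunElem j (by omega)]
      simp
    rw [this]
  rw [hpart1]
  have hpart2 : ((List.range ys.length).map ((t.length + 1) + ·)).filter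
      (pvPredN ((c :: t) ++ ys)) = (pvBndsN ys).map ((t.length + 1) + ·) := by
    rw [List.filter_map]
    unfold pvBndsN
    congr 1
    apply List.filter_congr
    intro j hj
    have hjlt : j < ys.length := by simpa using hj
    show pvPredN ((c :: t) ++ ys) ((t.length + 1) + j) = pvPredN ys j
    cases j with
    | zero =>
      obtain ⟨y, ys', hy⟩ : ∃ y ys', ys = y :: ys' := by
        cases ys with
        | nil => simp at hjlt
        | cons y ys' => exact ⟨y, ys', rfl⟩
      have hxm : ((c :: t) ++ ys)[t.length + 1 + 0]? = some y := by
        rw [hysElem 0 hjlt, hy]; rfl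
      have hxm1 : ((c :: t) ++ ys)[t.length + 1 + 0 - 1]? = some c := by
        have : t.length + 1 + 0 - 1 = t.length := by omega
        rw [this]
        exact hrunElem t.length (by omega)
      have hyc : y ≠ c := hys y ys' hy
      unfold pvPredN
      rw [hxm, hxm1]
      simp [hyc]
    | succ i =>
      have e1 : ((c :: t) ++ ys)[t.length + 1 + (i + 1)]? = ys[i + 1]? :=
        hysElem (i + 1) hjlt
      have e2 : ((c :: t) ++ ys)[t.length + 1 + (i + 1) - 1]? = ys[i]? := by
        have h : t.length + 1 + (i + 1) - 1 = t.length + 1 + i := by omega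
        rw [h]
        exact hysElem i (by omega)
      simp only [pvPredN, e1, e2, Nat.add_sub_cancel]
      have hz1 : ((t.length + 1 + (i + 1) == 0 : Bool)) = false := by simp
      have hz2 : ((i + 1 == 0 : Bool)) = false := by simp
      rw [hz1, hz2]
  rw [hpart2]
  rfl

theorem pvFullN_run (c : String) (t ys : List String) (ht : ∀ a ∈ t, a = c)
    (hys : ∀ x xs', ys = x :: xs' → x ≠ c) :
    pvFullN ((c :: t) ++ ys) = 0 :: (pvFullN ys).map ((t.length + 1) + ·) := by
  unfold pvFullN
  rw [pvBndsN_run c t ys ht hys]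
  simp only [List.map_append, List.map_cons, List.map_nil, List.cons_append,
    List.length_append, List.length_cons]
  have : t.length + ys.length + 1 = t.length + 1 + ys.length := by omega
  rw [this]

-- pvFullN always starts with 0.
theorem pvFullN_zero_cons (xs : List String) : ∃ l, pvFullN xs = 0 :: l := by
  cases xs with
  | nil => exact ⟨[], rfl⟩
  | cons a as =>
    refine ⟨((List.range as.length).map (·+1)).filter (pvPredN (a :: as)) ++ [(a :: as).length], ?_⟩
    simp only [pvFullN, pvBndsN, List.length_cons]
    rw [show as.length + 1 = as.length + 1 from rfl,
        (by simpa [Nat.succ_eq_add_one] using List.range_succ_eq_map (n := as.length) :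
          List.range (as.length + 1) = 0 :: (List.range as.length).map (·+1))]
    simp [pvPredN]

-- The staged zip-of-boundaries form equals the run recursion, for every shift.
theorem pvG_aux : ∀ (n : Nat) (xs : List String), xs.length ≤ n → ∀ (s : Nat),
    ((((pvFullN xs).map (s + ·)).zip (((pvFullN xs).map (s + ·)).tail)).map
        (fun ab => PySem.List.pyRange (ab.1 : Int) (ab.2 : Int) 1)) =
      pvBLoop xs (s : Int) := by
  intro n
  induction n with
  | zero =>
    intro xs hx s
    have hnil : xs = [] := List.length_eq_zero_iff.mp (Nat.le_zero.mp hx)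
    subst hnil
    simp [pvFullN, pvBndsN, pvBLoop]
  | succ n ih =>
    intro xs hx s
    cases xs with
    | nil => simp [pvFullN, pvBndsN, pvBLoop]
    | cons c rest =>
      set t := rest.takeWhile (· == c) with htdef
      set ys := rest.dropWhile (· == c) with hysdef
      set m := t.length + 1 with hm
      have hxs : c :: rest = (c :: t) ++ ys := by
        simp [htdef, hysdef, List.takeWhile_append_dropWhile]
      have ht : ∀ a ∈ t, a = c := by
        intro a ha
        have := List.mem_takeWhile_imp ha
        simpa using this
      have hysh : ∀ x xs', ys = x :: xs' → x ≠ c := by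
        intro x xs' h
        have h' : List.dropWhile (fun a => a == c) rest = x :: xs' := h
        have hne : List.dropWhile (fun a => a == c) rest ≠ [] := by simp [h']
        have hhead := List.head_dropWhile_not (fun a => a == c) (l := rest) hne
        rw [show (List.dropWhile (fun a => a == c) rest).head hne = x from by simp [h']] at hhead
        simpa using hhead
      have hfull := pvFullN_run c t ys ht hysh
      rw [← hxs] at hfull
      have hmap : ((0 :: (pvFullN ys).map (m + ·)).map (s + ·)) =
          s :: (pvFullN ys).map ((s + m) + ·) := by
        simp only [List.map_cons, Nat.add_zero, List.map_map]
        congr 1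
        apply List.map_congr_left
        intro k _
        simp only [Function.comp_apply]
        omega
      obtain ⟨l, hl⟩ := pvFullN_zero_cons ys
      have hX : (pvFullN ys).map ((s + m) + ·) = (s + m) :: l.map ((s + m) + ·) := by
        rw [hl]
        simp
      have hlen : ys.length ≤ n := by
        have h1 : ys.length ≤ rest.length := by
          rw [hysdef]
          exact List.length_dropWhile_le _ _
        have h2 : rest.length + 1 ≤ n + 1 := by simpa using hx
        omega
      have hIH := ih ys hlen (s + m)
      rw [hX] at hIH
      simp only [List.tail_cons] at hIH
      have hB : pvBLoop (c :: rest) (s : Int) =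
          PySem.List.pyRange (s : Int) (((s + m : Nat) : Int)) 1 ::
            pvBLoop ys (((s + m : Nat) : Int)) := by
        rw [pvBLoop]
        have hc : (s : Int) + (1 + ((rest.takeWhile (· == c)).length : Int)) =
            (((s + m : Nat) : Int)) := by
          rw [hm, htdef]
          push_cast
          ring
        rw [hc]
      rw [hfull, hmap, hX]
      simp only [List.tail_cons, List.zip_cons_cons, List.map_cons]
      rw [hB]
      exact congrArg _ hIH

theorem pvG_eq_pvBLoop (xs : List String) : ∀ (s : Nat),
    ((((pvFullN xs).map (s + ·)).zip (((pvFullN xs).map (s + ·)).tail)).map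
        (fun ab => PySem.List.pyRange (ab.1 : Int) (ab.2 : Int) 1)) =
      pvBLoop xs (s : Int) :=
  pvG_aux xs.length xs (Nat.le_refl _)

-- ===== VERDICT (by name: the statement is the Claim_ definition above) =====
theorem get_precursor_indices_spec : Claim_equal_get_precursor_indices := by
  intro xs _
  show get_precursor_indices xs = get_precursor_indices_alt xs
  rw [pvA_eq_pvBLoop]
  have halt : get_precursor_indices_alt xs =
      (((pvFullN xs).map (Nat.cast : Nat → Int)).zip
          (((pvFullN xs).map (Nat.cast : Nat → Int)).tail)).map
        (fun ab => PySem.List.pyRange ab.1 ab.2 1) := by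
    unfold get_precursor_indices_alt
    simp only [PySem.List.len_eq, PySem.List.pyRange_zero_natCast, PySem.List.slice_from_one,
      List.filter_map]
    have hfil : (List.range xs.length).filter
        ((fun i => i == 0 ||
          (PySem.List.pyGet? xs i != PySem.List.pyGet? xs (i - 1))) ∘ (Nat.cast : Nat → Int)) =
        pvBndsN xs := by
      unfold pvBndsN
      apply List.filter_congr
      intro k _
      exact pvPred_cast xs k
    rw [hfil]
    have : (pvBndsN xs).map (Nat.cast : Nat → Int) ++ [(xs.length : Int)] =
        (pvFullN xs).map (Nat.cast : Nat → Int) := by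
      simp [pvFullN]
    rw [this]
  have key : (((pvFullN xs).map (Nat.cast : Nat → Int)).zip
        (((pvFullN xs).map (Nat.cast : Nat → Int)).tail)).map
        (fun ab => PySem.List.pyRange ab.1 ab.2 1) =
      (((pvFullN xs).zip ((pvFullN xs).tail)).map
        (fun ab => PySem.List.pyRange (ab.1 : Int) (ab.2 : Int) 1)) := by
    rw [← List.map_tail, List.zip_map, List.map_map]
    rfl
  rw [halt, key]
  have h0 := pvG_eq_pvBLoop xs 0
  simp only [Nat.zero_add, Nat.cast_zero] at h0
  simp only [show ((fun x => x : Nat → Nat)) = id from rfl, List.map_id] at h0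
  exact h0.symm
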